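-- pv_equiv track=rewrite | github.com/wright-benjamin-1701/coding-agent | src/coding_agent/tools/test_generator_tool.py | _generate_sample_args
-- ===== SOURCE A (Python) =====
-- from typing import Dict, Any, List, Tuple, Optional, Set
--
-- def _generate_sample_args(args: List[Dict[str, Any]]) -> str:
--     """Generate sample argument assignments for test setup."""
--     if not args:
--         return "        # No arguments needed"
--
--     lines = []
--     for arg in args:
--         arg_name = arg["name"]
--         annotation = arg.get("annotation", "")
--         default = arg.get("default")
--
--         if default:
--             lines.append(f"        {arg_name} = {default}")
--         elif "int" in annotation.lower():
--             lines.append(f"        {arg_name} = 42")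
--         elif "str" in annotation.lower():
--             lines.append(f'        {arg_name} = "test_value"')
--         elif "list" in annotation.lower():
--             lines.append(f"        {arg_name} = [1, 2, 3]")
--         elif "dict" in annotation.lower():
--             lines.append(f'        {arg_name} = {{"key": "value"}}')
--         elif "bool" in annotation.lower():
--             lines.append(f"        {arg_name} = True")
--         else:
--             lines.append(f'        {arg_name} = "test_{arg_name}"')
--
--     return "\n".join(lines)
-- ===== SOURCE B (Python) =====
-- def _sample_value(arg):
--     """Pick the sample value for one argument spec."""
--     if arg.get("default"):
--         return arg["default"]
--     ann = arg.get("annotation", "").lower()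
--     matches = [v for k, v in (("int", "42"),
--                               ("str", '"test_value"'),
--                               ("list", "[1, 2, 3]"),
--                               ("dict", '{"key": "value"}'),
--                               ("bool", "True")) if k in ann]
--     return matches[0] if matches else '"test_' + arg["name"] + '"'
--
--
-- def _generate_sample_args(args):
--     """Generate sample argument assignments for test setup."""
--     if not args:
--         return "        # No arguments needed"
--     head, *rest = args
--     line = "        " + head["name"] + " = " + _sample_value(head)
--     return line if not rest else line + "\n" + _generate_sample_args(rest)
-- ===== Notes on version B (the rewrite author's own statement) =====
-- stated objective: alternative
-- what changed: B builds the result by structural recursion on the argument list, concatenating lines directly with no intermediate lines list and no join, and picks the sample value by filtering all matching keyword rules first and taking the head of that list instead of A's early-exit elif chain.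
import Mathlib
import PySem

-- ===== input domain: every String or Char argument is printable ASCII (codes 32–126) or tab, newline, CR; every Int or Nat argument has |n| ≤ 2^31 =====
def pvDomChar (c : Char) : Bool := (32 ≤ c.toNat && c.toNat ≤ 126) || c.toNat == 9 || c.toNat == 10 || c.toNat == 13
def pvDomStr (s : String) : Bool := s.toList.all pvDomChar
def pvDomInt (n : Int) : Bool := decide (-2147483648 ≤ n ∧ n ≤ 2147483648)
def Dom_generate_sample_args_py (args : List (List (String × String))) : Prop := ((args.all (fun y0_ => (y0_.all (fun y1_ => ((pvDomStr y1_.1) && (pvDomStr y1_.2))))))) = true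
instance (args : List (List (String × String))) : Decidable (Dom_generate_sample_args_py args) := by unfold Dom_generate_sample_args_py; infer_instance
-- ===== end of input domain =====

-- B recurses over the argument list, concatenating lines directly (no lines list, no join),
-- and picks each value by filtering all matching keyword rules and taking the head (alternative decomposition; same cost).

-- ===== PORT A =====
-- loop body of A: one line per arg (branches in A's order, full literal lines)
def aLine (arg : List (String × String)) : String :=
  let d := PySem.Dict.mk arg
  let arg_name := (d.get? "name").getD ""      -- Pre_ guarantees the key is present
  let annotation := d.getD "annotation" ""
  let default := (d.get? "default").getD ""    -- `if default:` — truthy iff present and non-empty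
  if default ≠ "" then "        " ++ arg_name ++ " = " ++ default
  else if PySem.Str.isIn "int" (PySem.Str.lower annotation) then "        " ++ arg_name ++ " = 42"
  else if PySem.Str.isIn "str" (PySem.Str.lower annotation) then "        " ++ arg_name ++ " = \"test_value\""
  else if PySem.Str.isIn "list" (PySem.Str.lower annotation) then "        " ++ arg_name ++ " = [1, 2, 3]"
  else if PySem.Str.isIn "dict" (PySem.Str.lower annotation) then "        " ++ arg_name ++ " = {\"key\": \"value\"}"
  else if PySem.Str.isIn "bool" (PySem.Str.lower annotation) then "        " ++ arg_name ++ " = True"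
  else "        " ++ arg_name ++ " = \"test_" ++ arg_name ++ "\""

def generate_sample_args_py (args : List (List (String × String))) : String :=
  if args = [] then "        # No arguments needed"
  else
    let lines := args.foldl (fun lines arg => lines ++ [aLine arg]) []
    PySem.Str.join "\n" lines

-- ===== PORT B =====
def bValue (arg : List (String × String)) : String :=
  let d := PySem.Dict.mk arg
  if ((d.get? "default").getD "") ≠ "" then (d.get? "default").getD ""
  else
    let ann := PySem.Str.lower (d.getD "annotation" "")
    let found :=
      (([("int", "42"), ("str", "\"test_value\""), ("list", "[1, 2, 3]"),
         ("dict", "{\"key\": \"value\"}"), ("bool", "True")] : List (String × String)).filter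
        (fun p => PySem.Str.isIn p.1 ann)).map (·.2)
    match found with
    | v :: _ => v
    | [] => "\"test_" ++ (d.get? "name").getD "" ++ "\""

def generate_sample_args_py_alt : List (List (String × String)) → String
  | [] => "        # No arguments needed"
  | head :: rest =>
    let line := "        " ++ ((PySem.Dict.mk head).get? "name").getD "" ++ " = " ++ bValue head
    if rest = [] then line else line ++ "\n" ++ generate_sample_args_py_alt rest

-- ===== PRECONDITION & SPEC =====
-- Pre_ excludes args lacking a "name" key: there A (and B) raise KeyError.
def Pre_generate_sample_args_py (args : List (List (String × String))) : Prop :=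
  ∀ arg ∈ args, arg.any (fun p => p.1 == "name") = true
instance (args : List (List (String × String))) : Decidable (Pre_generate_sample_args_py args) := by
  unfold Pre_generate_sample_args_py; infer_instance

def pvWitness_generate_sample_args_py : (List (List (String × String))) :=
  [[("name", "x"), ("annotation", "int")], [("name", "y"), ("default", "7")]]

def Spec_generate_sample_args_py (args : List (List (String × String))) (out : String) : Prop := out = generate_sample_args_py_alt args
instance (args : List (List (String × String))) (out : String) : Decidable (Spec_generate_sample_args_py args out) := by unfold Spec_generate_sample_args_py; infer_instance

-- ===== CLAIM (what is proved, stated in full; the proofs are below) =====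
def Claim_equal_generate_sample_args_py : Prop := ∀ (args : List (List (String × String))), Dom_generate_sample_args_py args → Pre_generate_sample_args_py args → Spec_generate_sample_args_py args (generate_sample_args_py args)

-- ===== LEMMAS AND PROOFS =====

set_option maxHeartbeats 1000000 in
theorem aLine_eq_bLine (arg : List (String × String)) :
    aLine arg = "        " ++ ((PySem.Dict.mk arg).get? "name").getD "" ++ " = " ++ bValue arg := by
  unfold aLine bValue
  dsimp only
  split_ifs <;>
    simp_all [List.filter_cons, String.append_assoc];
    rw [show (" = \"test_" : String) = " = " ++ "\"test_" from rfl, String.append_assoc]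

theorem ofList_newline_cons (L : List Char) :
    String.ofList ('\n' :: L) = "\n" ++ String.ofList L := by
  rw [show ('\n' :: L) = ['\n'] ++ L from rfl, String.ofList_append]

theorem str_join_singleton (x : String) : PySem.Str.join "\n" [x] = x := by
  simp [PySem.Str.join]

theorem str_join_cons (x y : String) (r : List String) :
    PySem.Str.join "\n" (x :: y :: r) = x ++ "\n" ++ PySem.Str.join "\n" (y :: r) := by
  simp [PySem.Str.join, PySem.Chars.join_cons_cons, String.ofList_append,
    ofList_newline_cons, String.append_assoc]

theorem join_map_eq_alt (a : List (String × String)) (l : List (List (String × String))) :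
    PySem.Str.join "\n" ((a :: l).map aLine) = generate_sample_args_py_alt (a :: l) := by
  induction l generalizing a with
  | nil =>
      rw [List.map, List.map, str_join_singleton, generate_sample_args_py_alt, aLine_eq_bLine]
      rfl
  | cons b r ih =>
      have h := ih b
      simp only [List.map] at h ⊢
      rw [generate_sample_args_py_alt, str_join_cons, h, aLine_eq_bLine]
      simp

-- ===== VERDICT (by name: the statement is the Claim_ definition above) =====
theorem generate_sample_args_py_spec : Claim_equal_generate_sample_args_py := by
  intro args _ _
  unfold Spec_generate_sample_args_py generate_sample_args_py
  split_ifs with h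
  · subst h; rfl
  · rw [PySem.List.foldl_append_singleton_eq_map]
    simp only [List.nil_append]
    obtain ⟨a, l, rfl⟩ := List.exists_cons_of_ne_nil h
    exact join_map_eq_alt a l
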